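-- pv_equiv track=rewrite | github.com/elyithium/ctpa | dynascan-gui/server/scanner/cryptographic_scanner/cryptographic_scanner.py | split_cipher_suite
-- ===== SOURCE A (Python) =====
-- def split_cipher_suite(cipher_suite):
--     # Step 1: Split the cipher suite string by dashes
--     parts = cipher_suite.split('-')
--
--     # Step 2: Initialize the components
--     key_exchange = None
--     authentication = None
--     encryption_algorithm = None
--     mode_of_operation = None
--     hash_algorithm = None
--
--     # Define known elements
--     key_exchange_algorithms = ['ECDHE', 'DHE', 'DH']
--     authentication_algorithms = ['RSA', 'ECDSA', 'DSA']
--     encryption_algorithms = ['AES', 'DES', 'ChaCha20', 'RC4']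
--     modes_of_operation = ['GCM', 'CBC', 'CCM']
--     hash_algorithms = ['SHA256', 'SHA384', 'SHA512', 'MD5']
--
--     # Step 3: Parse the cipher suite
--     for part in parts:
--         # Check for key exchange algorithm
--         if part in key_exchange_algorithms and key_exchange is None:
--             key_exchange = part
--         # Check for authentication algorithm
--         elif part in authentication_algorithms and authentication is None:
--             authentication = part
--         # Check for encryption algorithm
--         elif part in encryption_algorithms and encryption_algorithm is None:
--             encryption_algorithm = part
--         # Check for mode of operation (e.g., GCM or CBC)
--         elif part in modes_of_operation and mode_of_operation is None:
--             mode_of_operation = part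
--         # Check for MAC algorithm
--         elif part in hash_algorithms and hash_algorithm is None:
--             hash_algorithm = part
--
--     # Handle cases where encryption_algorithm is missing (e.g., ECDHE-RSA-GCM-SHA256)
--     if encryption_algorithm is None and mode_of_operation is not None:
--         encryption_algorithm = parts[2]  # Assume the second part before the mode is the encryption algorithm
--
--     return (key_exchange or 'Unknown'), (authentication or 'Unknown'), (encryption_algorithm or 'Unknown'), (mode_of_operation or 'Unknown'), (hash_algorithm or 'Unknown')
-- ===== SOURCE B (Python) =====
-- def split_cipher_suite(cipher_suite):
--     parts = cipher_suite.split('-')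
--     categories = (['ECDHE', 'DHE', 'DH'],
--                   ['RSA', 'ECDSA', 'DSA'],
--                   ['AES', 'DES', 'ChaCha20', 'RC4'],
--                   ['GCM', 'CBC', 'CCM'],
--                   ['SHA256', 'SHA384', 'SHA512', 'MD5'])
--     kex, auth, enc, mode, hsh = (next((p for p in parts if p in cat), None)
--                                  for cat in categories)
--     if enc is None and mode is not None:
--         enc = parts[2]
--     return tuple(x or 'Unknown' for x in (kex, auth, enc, mode, hsh))
-- ===== Notes on version B (the rewrite author's own statement) =====
-- stated objective: simpler
-- what changed: Replaces the part-major loop with a five-slot elif chain and mutable state by a category-major pass: for each of the five category lists, take the first part belonging to it via next(...), then the same parts[2] fallback and the same Unknown defaults.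
import Mathlib
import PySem

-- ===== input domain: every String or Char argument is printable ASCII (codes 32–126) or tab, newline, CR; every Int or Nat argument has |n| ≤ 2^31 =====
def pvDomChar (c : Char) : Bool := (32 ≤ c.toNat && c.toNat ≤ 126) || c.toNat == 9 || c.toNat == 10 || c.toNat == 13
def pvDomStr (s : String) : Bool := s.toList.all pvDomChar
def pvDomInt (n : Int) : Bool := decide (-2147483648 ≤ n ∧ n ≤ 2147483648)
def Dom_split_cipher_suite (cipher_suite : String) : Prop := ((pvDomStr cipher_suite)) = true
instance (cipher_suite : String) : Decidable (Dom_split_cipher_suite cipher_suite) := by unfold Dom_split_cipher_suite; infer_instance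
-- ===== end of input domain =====

-- B replaces A's part-major elif-chain loop with five independent category-major first-match scans; objective: simpler.
-- Where Python A raises (the parts[2] IndexError), Python B raises identically; those inputs are excluded by Pre_.

-- ===== PORT A =====
def pvKex : List String := ["ECDHE", "DHE", "DH"]
def pvAuth : List String := ["RSA", "ECDSA", "DSA"]
def pvEnc : List String := ["AES", "DES", "ChaCha20", "RC4"]
def pvMode : List String := ["GCM", "CBC", "CCM"]
def pvHash : List String := ["SHA256", "SHA384", "SHA512", "MD5"]

-- Python's `x or 'Unknown'` ('' is falsy)
def pvOrUnknown (o : Option String) : String :=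
  match o with
  | none => "Unknown"
  | some s => if s = "" then "Unknown" else s

-- one iteration of A's for-loop (the if/elif chain over the five slots)
def pvStepA (st : Option String × Option String × Option String × Option String × Option String)
    (part : String) : Option String × Option String × Option String × Option String × Option String :=
  if pvKex.contains part && st.1.isNone then
    (some part, st.2)
  else if pvAuth.contains part && st.2.1.isNone then
    (st.1, some part, st.2.2)
  else if pvEnc.contains part && st.2.2.1.isNone then
    (st.1, st.2.1, some part, st.2.2.2)
  else if pvMode.contains part && st.2.2.2.1.isNone then
    (st.1, st.2.1, st.2.2.1, some part, st.2.2.2.2)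
  else if pvHash.contains part && st.2.2.2.2.isNone then
    (st.1, st.2.1, st.2.2.1, st.2.2.2.1, some part)
  else st

def split_cipher_suite (cipher_suite : String) : String × String × String × String × String :=
  let parts := (PySem.Str.split? cipher_suite "-").getD []
  let st := parts.foldl pvStepA (none, none, none, none, none)
  -- fallback: `parts[2]`; Python raises IndexError when pyGet? = none (outside Pre_)
  let enc := if st.2.2.1.isNone && st.2.2.2.1.isSome then PySem.List.pyGet? parts 2 else st.2.2.1
  (pvOrUnknown st.1, pvOrUnknown st.2.1, pvOrUnknown enc, pvOrUnknown st.2.2.2.1, pvOrUnknown st.2.2.2.2)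

-- ===== PORT B =====
-- B's `next((p for p in parts if p in cat), None)`
def pvFirstIn (parts cat : List String) : Option String :=
  parts.find? (fun p => cat.contains p)

def split_cipher_suite_alt (cipher_suite : String) : String × String × String × String × String :=
  let parts := (PySem.Str.split? cipher_suite "-").getD []
  let kex := pvFirstIn parts pvKex
  let auth := pvFirstIn parts pvAuth
  let enc0 := pvFirstIn parts pvEnc
  let mode := pvFirstIn parts pvMode
  let hsh := pvFirstIn parts pvHash
  let enc := if enc0.isNone && mode.isSome then PySem.List.pyGet? parts 2 else enc0
  (pvOrUnknown kex, pvOrUnknown auth, pvOrUnknown enc, pvOrUnknown mode, pvOrUnknown hsh)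

-- ===== PRECONDITION & SPEC =====
-- Pre_ excludes exactly the inputs where A raises IndexError at parts[2]:
-- fewer than 3 dash-parts, a mode-of-operation token present, and no encryption token.
def Pre_split_cipher_suite (cipher_suite : String) : Prop :=
  let parts := (PySem.Str.split? cipher_suite "-").getD []
  (∃ p ∈ parts, pvEnc.contains p) ∨ (∀ p ∈ parts, ¬ pvMode.contains p) ∨ 3 ≤ parts.length
instance (cipher_suite : String) : Decidable (Pre_split_cipher_suite cipher_suite) := by
  unfold Pre_split_cipher_suite; infer_instance

def pvWitness_split_cipher_suite : String := "ECDHE-RSA-AES-GCM-SHA256"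

def Spec_split_cipher_suite (cipher_suite : String) (out : String × String × String × String × String) : Prop := out = split_cipher_suite_alt cipher_suite
instance (cipher_suite : String) (out : String × String × String × String × String) : Decidable (Spec_split_cipher_suite cipher_suite out) := by unfold Spec_split_cipher_suite; infer_instance

-- ===== CLAIM (what is proved, stated in full; the proofs are below) =====
def Claim_equal_split_cipher_suite : Prop := ∀ (cipher_suite : String), Dom_split_cipher_suite cipher_suite → Pre_split_cipher_suite cipher_suite → Spec_split_cipher_suite cipher_suite (split_cipher_suite cipher_suite)

-- ===== LEMMAS AND PROOFS =====

-- the five category lists are pairwise disjoint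
lemma pvKex_excl (p : String) (h : p ∈ pvKex) :
    p ∉ pvAuth ∧ p ∉ pvEnc ∧ p ∉ pvMode ∧ p ∉ pvHash := by
  fin_cases h <;> decide

lemma pvAuth_excl (p : String) (h : p ∈ pvAuth) :
    p ∉ pvKex ∧ p ∉ pvEnc ∧ p ∉ pvMode ∧ p ∉ pvHash := by
  fin_cases h <;> decide

lemma pvEnc_excl (p : String) (h : p ∈ pvEnc) :
    p ∉ pvKex ∧ p ∉ pvAuth ∧ p ∉ pvMode ∧ p ∉ pvHash := by
  fin_cases h <;> decide

lemma pvMode_excl (p : String) (h : p ∈ pvMode) :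
    p ∉ pvKex ∧ p ∉ pvAuth ∧ p ∉ pvEnc ∧ p ∉ pvHash := by
  fin_cases h <;> decide

lemma pvHash_excl (p : String) (h : p ∈ pvHash) :
    p ∉ pvKex ∧ p ∉ pvAuth ∧ p ∉ pvEnc ∧ p ∉ pvMode := by
  fin_cases h <;> decide

def pvUpd (cat : List String) (o : Option String) (p : String) : Option String :=
  if cat.contains p && o.isNone then some p else o

-- because the five lists are disjoint, A's elif chain updates each slot independently
lemma pvStepA_char (st : Option String × Option String × Option String × Option String × Option String)
    (p : String) :
    pvStepA st p = (pvUpd pvKex st.1 p, pvUpd pvAuth st.2.1 p, pvUpd pvEnc st.2.2.1 p,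
      pvUpd pvMode st.2.2.2.1 p, pvUpd pvHash st.2.2.2.2 p) := by
  obtain ⟨a, b, c, d, e⟩ := st
  by_cases h1 : p ∈ pvKex
  · obtain ⟨x1, x2, x3, x4⟩ := pvKex_excl p h1
    simp only [pvStepA, pvUpd]
    simp [h1, x1, x2, x3, x4]
    cases a <;> simp
  · by_cases h2 : p ∈ pvAuth
    · obtain ⟨x1, x2, x3, x4⟩ := pvAuth_excl p h2
      simp only [pvStepA, pvUpd]
      simp [h2, x1, x2, x3, x4]
      cases b <;> simp
    · by_cases h3 : p ∈ pvEnc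
      · obtain ⟨x1, x2, x3, x4⟩ := pvEnc_excl p h3
        simp only [pvStepA, pvUpd]
        simp [h3, x1, x2, x3, x4]
        cases c <;> simp
      · by_cases h4 : p ∈ pvMode
        · obtain ⟨x1, x2, x3, x4⟩ := pvMode_excl p h4
          simp only [pvStepA, pvUpd]
          simp [h4, x1, x2, x3, x4]
          cases d <;> simp
        · by_cases h5 : p ∈ pvHash
          · obtain ⟨x1, x2, x3, x4⟩ := pvHash_excl p h5
            simp only [pvStepA, pvUpd]
            simp [h5, x1, x2, x3, x4]
            cases e <;> simp
          · simp only [pvStepA, pvUpd]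
            simp [h1, h2, h3, h4, h5]

-- resuming a single-slot update from a partial state: set-if-none composes with find?
lemma pvUpd_fold (cat : List String) (parts : List String) :
    ∀ (o : Option String),
      parts.foldl (pvUpd cat) o = (match o with | some x => some x | none => pvFirstIn parts cat) := by
  induction parts with
  | nil => intro o; cases o <;> simp [pvFirstIn]
  | cons p rest ih =>
    intro o
    cases o with
    | some x => simp [List.foldl_cons, pvUpd, ih]
    | none =>
      simp only [List.foldl_cons, pvUpd, Option.isNone_none, Bool.and_true]
      by_cases h : p ∈ cat
      · simp [h, ih, pvFirstIn]
      · simp [h, ih, pvFirstIn]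

-- A's fold computes the five first-matches of B
lemma pvFoldA_char (parts : List String) :
    parts.foldl pvStepA (none, none, none, none, none) =
      (pvFirstIn parts pvKex, pvFirstIn parts pvAuth, pvFirstIn parts pvEnc,
       pvFirstIn parts pvMode, pvFirstIn parts pvHash) := by
  have key : ∀ (st : Option String × Option String × Option String × Option String × Option String),
      parts.foldl pvStepA st =
        (parts.foldl (pvUpd pvKex) st.1, parts.foldl (pvUpd pvAuth) st.2.1,
         parts.foldl (pvUpd pvEnc) st.2.2.1, parts.foldl (pvUpd pvMode) st.2.2.2.1,
         parts.foldl (pvUpd pvHash) st.2.2.2.2) := by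
    induction parts with
    | nil => intro st; rfl
    | cons p rest ih =>
      intro st
      simp only [List.foldl_cons, ih, pvStepA_char]
  rw [key]
  simp [pvUpd_fold]

-- ===== VERDICT (by name: the statement is the Claim_ definition above) =====
theorem split_cipher_suite_spec : Claim_equal_split_cipher_suite := by
  intro cipher_suite _ _
  unfold Spec_split_cipher_suite split_cipher_suite split_cipher_suite_alt
  simp only [pvFoldA_char]
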